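-- pv_equiv track=rewrite | github.com/markh-de/KiVar | source/kivar.py | split_parens
-- ===== SOURCE A (Python) =====
-- def split_parens(str):
--     item = []
--     outside = None
--     inside = None
--     escaped = False
--     quoted = False
--     parens = 0
--     end_expected = False
--     for c in str:
--         if end_expected: raise ValueError('String extends beyond closing parenthesis')
--         elif escaped:
--             escaped = False
--             item.append(c)
--         elif c == '\\':
--             escaped = True
--             item.append(c)
--         elif c == "'":
--             quoted = not quoted
--             item.append(c)
--         elif c == '(' and not quoted:
--             parens += 1
--             if parens == 1:
--                 outside = ''.join(item)
--                 inside = '' # inside: no parens -> None, empty parens -> ''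
--                 item = []
--             else:
--                 item.append(c)
--         elif c == ')' and not quoted:
--             if parens > 0:
--                 parens -= 1
--                 if parens == 0:
--                     inside = ''.join(item)
--                     item = []
--                     end_expected = True
--                 else:
--                     item.append(c)
--             else:  raise ValueError('Unmatched closing parenthesis')
--         else:
--             item.append(c)
--     if parens > 0: raise ValueError('Unmatched opening parenthesis')
--     if quoted:     raise ValueError('Unmatched quote character in string')
--     if escaped:    raise ValueError('Unterminated escape sequence at end of string')
--     if item: outside = ''.join(item)
--     return outside, inside
-- ===== SOURCE B (Python) =====
-- def split_parens(str):
--     # index-based scan: record position of the outer '(' and its matching ')',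
--     # then slice; never accumulates characters.
--     escaped = False
--     quoted = False
--     depth = 0
--     open_idx = None
--     close_idx = None
--     for i, c in enumerate(str):
--         if close_idx is not None:
--             raise ValueError('String extends beyond closing parenthesis')
--         if escaped:
--             escaped = False
--         elif c == '\\':
--             escaped = True
--         elif c == "'":
--             quoted = not quoted
--         elif c == '(' and not quoted:
--             depth += 1
--             if depth == 1:
--                 open_idx = i
--         elif c == ')' and not quoted:
--             if depth == 0:
--                 raise ValueError('Unmatched closing parenthesis')
--             depth -= 1
--             if depth == 0:
--                 close_idx = i
--     if depth > 0:
--         raise ValueError('Unmatched opening parenthesis')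
--     if quoted:
--         raise ValueError('Unmatched quote character in string')
--     if escaped:
--         raise ValueError('Unterminated escape sequence at end of string')
--     if open_idx is None:
--         return (str if str else None), None
--     return str[:open_idx], str[open_idx + 1:close_idx]
-- ===== Notes on version B (the rewrite author's own statement) =====
-- stated objective: simpler
-- what changed: Instead of accumulating characters into a list and joining them at the outer parentheses, B does one scan that only records the index of the outer opening paren and its matching closing paren (tracking escape/quote/depth state) and returns two slices of the input string.
import Mathlib
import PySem

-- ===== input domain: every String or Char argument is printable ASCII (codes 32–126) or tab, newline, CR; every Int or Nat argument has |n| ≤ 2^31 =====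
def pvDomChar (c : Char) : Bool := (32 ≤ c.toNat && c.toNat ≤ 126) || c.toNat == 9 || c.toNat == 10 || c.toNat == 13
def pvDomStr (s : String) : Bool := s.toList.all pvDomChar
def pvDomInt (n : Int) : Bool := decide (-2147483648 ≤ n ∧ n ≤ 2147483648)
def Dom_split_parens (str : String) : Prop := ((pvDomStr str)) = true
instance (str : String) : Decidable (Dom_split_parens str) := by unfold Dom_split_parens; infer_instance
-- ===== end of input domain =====

-- B replaces A's character-accumulating scan by an index-recording scan plus two slices (objective: simpler).

-- ===== PORT A =====
-- loop over the characters; state = (item, outside, inside, escaped, quoted, parens, end_expected);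
-- `none` = the Python raises ValueError there (excluded by Pre_).
def pvLoopA : List Char → List Char → Option String → Option String → Bool → Bool → Nat → Bool →
    Option (Option String × Option String)
  | [], item, outside, inside, escaped, quoted, parens, _ =>
    if parens > 0 then none
    else if quoted then none
    else if escaped then none
    else some (if item ≠ [] then some (String.ofList item) else outside, inside)
  | c :: rest, item, outside, inside, escaped, quoted, parens, end_expected =>
    if end_expected then none
    else if escaped then pvLoopA rest (item ++ [c]) outside inside false quoted parens end_expected
    else if c = '\\' then pvLoopA rest (item ++ [c]) outside inside true quoted parens end_expected
    else if c = '\'' then pvLoopA rest (item ++ [c]) outside inside escaped (!quoted) parens end_expected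
    else if c = '(' ∧ quoted = false then
      if parens + 1 = 1 then
        pvLoopA rest [] (some (String.ofList item)) (some "") escaped quoted (parens + 1) end_expected
      else pvLoopA rest (item ++ [c]) outside inside escaped quoted (parens + 1) end_expected
    else if c = ')' ∧ quoted = false then
      if parens > 0 then
        if parens - 1 = 0 then
          pvLoopA rest [] outside (some (String.ofList item)) escaped quoted (parens - 1) true
        else pvLoopA rest (item ++ [c]) outside inside escaped quoted (parens - 1) end_expected
      else none
    else pvLoopA rest (item ++ [c]) outside inside escaped quoted parens end_expected

def split_parens (str : String) : Option String × Option String :=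
  (pvLoopA str.toList [] none none false false 0 false).getD (none, none)

-- ===== PORT B =====
-- index scan: only records open_idx / close_idx; `none` = the Python raises ValueError there.
def pvLoopB : List Char → Nat → Bool → Bool → Nat → Option Nat → Option Nat →
    Option (Option Nat × Option Nat)
  | [], _, escaped, quoted, depth, oi, ci =>
    if depth > 0 ∨ quoted = true ∨ escaped = true then none else some (oi, ci)
  | c :: rest, i, escaped, quoted, depth, oi, ci =>
    if ci.isSome then none
    else if escaped then pvLoopB rest (i + 1) false quoted depth oi ci
    else if c = '\\' then pvLoopB rest (i + 1) true quoted depth oi ci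
    else if c = '\'' then pvLoopB rest (i + 1) escaped (!quoted) depth oi ci
    else if c = '(' ∧ quoted = false then
      pvLoopB rest (i + 1) escaped quoted (depth + 1) (if depth + 1 = 1 then some i else oi) ci
    else if c = ')' ∧ quoted = false then
      if depth = 0 then none
      else pvLoopB rest (i + 1) escaped quoted (depth - 1) oi (if depth - 1 = 0 then some i else ci)
    else pvLoopB rest (i + 1) escaped quoted depth oi ci

-- str[:open_idx] and str[open_idx+1:close_idx] with 0 ≤ open_idx < close_idx < len:
-- exactly List.take / drop on the character list (Python slicing with in-range nonnegative indices).
def pvAssemble (l : List Char) : Option Nat × Option Nat → Option String × Option String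
  | (none, _) => (if l = [] then none else some (String.ofList l), none)
  | (some _, none) => (none, none)   -- unreachable: open without close is an error in the loop
  | (some j, some k) => (some (String.ofList (l.take j)), some (String.ofList ((l.take k).drop (j + 1))))

def split_parens_alt (str : String) : Option String × Option String :=
  match pvLoopB str.toList 0 false false 0 none none with
  | none => (none, none)
  | some r => pvAssemble str.toList r

-- ===== PRECONDITION & SPEC =====
-- Pre_ excludes exactly the strings on which A raises ValueError (unmatched ')' at top level,
-- characters after the closing ')', or an unclosed paren/quote/escape at end of string);
-- B raises the same errors there.  pvValid is the validity automaton (escaped, quoted, depth, closed).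
def pvValid : List Char → Bool → Bool → Nat → Bool → Bool
  | [], escaped, quoted, depth, _ => !escaped && !quoted && depth == 0
  | c :: rest, escaped, quoted, depth, closed =>
    if closed then false
    else if escaped then pvValid rest false quoted depth closed
    else if c = '\\' then pvValid rest true quoted depth closed
    else if c = '\'' then pvValid rest escaped (!quoted) depth closed
    else if c = '(' ∧ quoted = false then pvValid rest escaped quoted (depth + 1) closed
    else if c = ')' ∧ quoted = false then
      if depth = 0 then false else pvValid rest escaped quoted (depth - 1) (depth - 1 == 0)
    else pvValid rest escaped quoted depth closed

def Pre_split_parens (str : String) : Prop := pvValid str.toList false false 0 false = true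
instance (str : String) : Decidable (Pre_split_parens str) := by unfold Pre_split_parens; infer_instance
def pvWitness_split_parens : String := "a(b)"

def Spec_split_parens (str : String) (out : Option String × Option String) : Prop := out = split_parens_alt str
instance (str : String) (out : Option String × Option String) : Decidable (Spec_split_parens str out) := by unfold Spec_split_parens; infer_instance

-- ===== CLAIM (what is proved, stated in full; the proofs are below) =====
def Claim_equal_split_parens : Prop := ∀ (str : String), Dom_split_parens str → Pre_split_parens str → Spec_split_parens str (split_parens str)

-- ===== LEMMAS AND PROOFS =====

-- invariant tying A's accumulated state to B's recorded indices, after consuming `pre`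
def pvInv (pre : List Char) (item : List Char) (outside inside : Option String)
    (depth : Nat) (ee : Bool) (oi ci : Option Nat) : Prop :=
  match oi, ci with
  | none, _ => ci = none ∧ depth = 0 ∧ ee = false ∧ item = pre ∧ outside = none ∧ inside = none
  | some j, none => j < pre.length ∧ 1 ≤ depth ∧ ee = false ∧ item = pre.drop (j + 1) ∧
      outside = some (String.ofList (pre.take j)) ∧ inside = some ""
  | some j, some k => j < k ∧ k < pre.length ∧ depth = 0 ∧ ee = true ∧ item = [] ∧
      outside = some (String.ofList (pre.take j)) ∧
      inside = some (String.ofList ((pre.take k).drop (j + 1)))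

theorem pvMain (rest : List Char) : ∀ (pre item : List Char) (outside inside : Option String)
    (escaped quoted : Bool) (depth : Nat) (ee : Bool) (oi ci : Option Nat),
    pvInv pre item outside inside depth ee oi ci →
    pvLoopA rest item outside inside escaped quoted depth ee =
      Option.map (pvAssemble (pre ++ rest)) (pvLoopB rest pre.length escaped quoted depth oi ci) := by
  induction rest with
  | nil =>
    intro pre item outside inside escaped quoted depth ee oi ci hinv
    rcases oi with _ | j <;> rcases ci with _ | k <;> simp only [pvInv] at hinv
    · obtain ⟨-, hd, he, hi, ho, hins⟩ := hinv
      subst hd he hi ho hins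
      cases quoted <;> cases escaped <;>
        simp [pvLoopA, pvLoopB, pvAssemble]
    · exact absurd hinv.1 (by simp)
    · obtain ⟨hj, hd, he, hi, ho, hins⟩ := hinv
      subst he hi ho hins
      simp [pvLoopA, pvLoopB, Nat.lt_of_lt_of_le Nat.zero_lt_one hd]
    · obtain ⟨hjk, hk, hd, he, hi, ho, hins⟩ := hinv
      subst hd he hi ho hins
      cases quoted <;> cases escaped <;> simp [pvLoopA, pvLoopB, pvAssemble]
  | cons c rest ih =>
    intro pre item outside inside escaped quoted depth ee oi ci hinv
    rcases oi with _ | j <;> rcases ci with _ | k <;> simp only [pvInv] at hinv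
    · -- no paren seen yet: pre = item
      obtain ⟨-, hd, he, hi, ho, hins⟩ := hinv
      subst hd he hi ho hins
      have hsplit1 : item ++ c :: rest = (item ++ [c]) ++ rest := by simp
      simp only [pvLoopA, pvLoopB, hsplit1, Option.isSome_none, Bool.false_eq_true, if_false]
      cases escaped with
      | true =>
        simpa using ih (item ++ [c]) (item ++ [c]) none none false quoted 0 false none none
          (by simp [pvInv])
      | false =>
        simp only [Bool.false_eq_true, if_false]
        by_cases h2 : c = '\\'
        · simpa [h2] using ih (item ++ [c]) (item ++ [c]) none none true quoted 0 false none none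
            (by simp [pvInv])
        · simp only [if_neg h2]
          by_cases h3 : c = '\''
          · simpa [h3] using ih (item ++ [c]) (item ++ [c]) none none false (!quoted) 0 false
              none none (by simp [pvInv])
          · simp only [if_neg h3]
            cases quoted with
            | true =>
              simpa using ih (item ++ [c]) (item ++ [c]) none none false true 0 false none none
                (by simp [pvInv])
            | false =>
              by_cases h4 : c = '('
              · simpa [h4] using ih (item ++ [c]) [] (some (String.ofList item)) (some "")
                  false false 1 false (some item.length) none (by simp [pvInv])
              · by_cases h5 : c = ')'
                · simp [h5]
                · simpa [h4, h5] using ih (item ++ [c]) (item ++ [c]) none none false false 0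
                    false none none (by simp [pvInv])
    · exact absurd hinv.1 (by simp)
    · -- inside the outer parens
      obtain ⟨hj, hd, he, hi, ho, hins⟩ := hinv
      subst he hi ho hins
      have hsplit : pre ++ c :: rest = (pre ++ [c]) ++ rest := by simp
      have hdrop : (pre ++ [c]).drop (j + 1) = pre.drop (j + 1) ++ [c] :=
        List.drop_append_of_le_length hj
      have htake : (pre ++ [c]).take j = pre.take j :=
        List.take_append_of_le_length (Nat.le_of_lt hj)
      have hinv2 : ∀ d : Nat, 1 ≤ d → pvInv (pre ++ [c]) (pre.drop (j + 1) ++ [c])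
          (some (String.ofList (pre.take j))) (some "") d false (some j) none :=
        fun d hd1 => ⟨by simp; omega, hd1, rfl, hdrop.symm, by rw [htake], rfl⟩
      simp only [pvLoopA, pvLoopB, hsplit, Option.isSome_none, Bool.false_eq_true, if_false]
      cases escaped with
      | true =>
        simpa using ih (pre ++ [c]) _ _ _ false quoted depth false (some j) none (hinv2 depth hd)
      | false =>
        simp only [Bool.false_eq_true, if_false]
        by_cases h2 : c = '\\'
        · simpa [h2] using ih (pre ++ [c]) _ _ _ true quoted depth false (some j) none
            (hinv2 depth hd)
        · simp only [if_neg h2]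
          by_cases h3 : c = '\''
          · simpa [h3] using ih (pre ++ [c]) _ _ _ false (!quoted) depth false (some j) none
              (hinv2 depth hd)
          · simp only [if_neg h3]
            cases quoted with
            | true =>
              simpa using ih (pre ++ [c]) _ _ _ false true depth false (some j) none
                (hinv2 depth hd)
            | false =>
              by_cases h4 : c = '('
              · subst h4
                have hne : ¬ depth = 0 := by omega
                simpa [hne] using ih (pre ++ ['(']) _ _ _ false false (depth + 1) false
                  (some j) none (hinv2 (depth + 1) (by omega))
              · by_cases h5 : c = ')'
                · subst h5
                  have hd0 : ¬ depth = 0 := by omega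
                  have hdp : depth > 0 := by omega
                  simp only [if_neg hd0, if_pos hdp]
                  by_cases h6 : depth - 1 = 0
                  · have hinv3 : pvInv (pre ++ [')']) [] (some (String.ofList (pre.take j)))
                        (some (String.ofList (pre.drop (j + 1)))) 0 true (some j)
                        (some pre.length) := by
                      refine ⟨hj, by simp, rfl, rfl, rfl, by rw [htake], ?_⟩
                      have h7 : (pre ++ [')']).take pre.length = pre := by simp
                      rw [h7]
                    simpa [h6] using ih (pre ++ [')']) [] _ _ false false 0 true
                      (some j) (some pre.length) hinv3
                  · simpa [h6] using ih (pre ++ [')']) _ _ _ false false (depth - 1) false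
                      (some j) none (hinv2 (depth - 1) (by omega))
                · simpa [h4, h5] using ih (pre ++ [c]) _ _ _ false false depth false (some j)
                    none (hinv2 depth hd)
    · -- already closed: next char is an error in both
      obtain ⟨hjk, hk, hd, he, hi, ho, hins⟩ := hinv
      subst he
      simp [pvLoopA, pvLoopB]

-- ===== VERDICT (by name: the statement is the Claim_ definition above) =====
theorem split_parens_spec : Claim_equal_split_parens := by
  intro str _ _
  unfold Spec_split_parens split_parens split_parens_alt
  have h := pvMain str.toList [] [] none none false false 0 false none none (by simp [pvInv])
  simp at h
  rw [h]
  cases hB : pvLoopB str.toList 0 false false 0 none none <;> simp
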